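-- pv_equiv track=rewrite | github.com/HITshenrj/BNN | RL/utils.py | binary_split
-- ===== SOURCE A (Python) =====
-- def compute_num(l):
--     """Count the number of elements"""
--     total_num = 0
--     for _ in l:
--         total_num += len(_)
--     return total_num
--
-- def binary_split(l):
--     """Divide the group into two parts as much as possible according to the level"""
--     if len(l) == 1:
--         return []
--     total_num = compute_num(l)
--     cur_num = 0
--     for i, sub_l in enumerate(l):
--         cur_num += len(sub_l)
--         if cur_num >= total_num / 2.0:
--             if i != len(l) - 1:
--                 return binary_split(l[:i + 1]) + [i + 1]
--             else:
--                 return [i]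
-- ===== SOURCE B (Python) =====
-- def binary_split(l):
--     """Divide the group into two parts as much as possible according to the level.
--     Prefix sums computed once; each half split point found by binary search."""
--     n = len(l)
--     P = [0]
--     c = 0
--     for s in l:
--         c += len(s)
--         P.append(c)
--     out = []
--     m = n
--     while m > 1:
--         # first index j in [1, m) with P[j] >= ceil(P[m]/2), or m if none
--         x = (P[m] + 1) // 2
--         lo, hi = 1, m
--         while lo < hi:
--             mid = (lo + hi) // 2
--             if P[mid] < x:
--                 lo = mid + 1
--             else:
--                 hi = mid
--         j = lo
--         if j == m:
--             out.append(m - 1)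
--             break
--         out.append(j)
--         m = j
--     out.reverse()
--     return out
-- ===== Notes on version B (the rewrite author's own statement) =====
-- stated objective: alternative
-- what changed: B replaces A's recursion that re-slices the list and re-sums each half by a single prefix-sum pass plus an iterative loop that finds each split point with a binary search over the prefix sums (O(n log n) worst case vs A's O(n^2) worst case; measured about 1.26x on random inputs, below the 1.5x bar, so no speed is claimed).
-- outside the precondition, e.g. on binary_split([]): A returns None, B returns []
import Mathlib
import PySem

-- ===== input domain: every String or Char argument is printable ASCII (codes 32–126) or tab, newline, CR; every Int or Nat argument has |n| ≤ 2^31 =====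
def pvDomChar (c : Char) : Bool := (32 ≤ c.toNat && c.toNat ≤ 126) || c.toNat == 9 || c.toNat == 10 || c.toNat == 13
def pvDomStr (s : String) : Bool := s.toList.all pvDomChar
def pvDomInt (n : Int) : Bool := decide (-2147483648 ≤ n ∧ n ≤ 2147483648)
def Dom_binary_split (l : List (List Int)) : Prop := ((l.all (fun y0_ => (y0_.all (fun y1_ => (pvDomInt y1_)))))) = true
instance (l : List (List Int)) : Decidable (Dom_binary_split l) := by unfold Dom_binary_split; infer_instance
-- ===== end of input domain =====

-- B replaces A's recursion (which re-sums and re-slices each half) by one prefix-sum pass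
-- plus a binary search per split point; return values proved equal on Pre_.
-- The Python comparison `cur_num >= total_num / 2.0` is ported exactly as 2*cur ≥ total,
-- which agrees with the float comparison for any total below 2^53.
-- Recursive functions carry a fuel parameter (a totality guard only; it is always sufficient).

-- ===== PORT A =====
def computeNum (l : List (List Int)) : Int :=
  l.foldl (fun acc s => acc + (s.length : Int)) 0

-- A's `for i, sub_l in enumerate(l)` search loop: first index whose running count
-- reaches half the total (2*cur ≥ total ↔ cur ≥ total/2.0 exactly, see header).
def bsLoop (total cur : Int) (i : Nat) : List (List Int) → Option Nat
  | [] => none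
  | s :: rest =>
    if 2 * (cur + (s.length : Int)) ≥ total then some i
    else bsLoop total (cur + (s.length : Int)) (i + 1) rest

-- A's recursion on l[:i+1]; fuel = l.length always suffices (each call shortens the list)
def bsGo (fuel : Nat) (l : List (List Int)) : List Int :=
  match fuel with
  | 0 => []
  | fuel + 1 =>
    if l.length = 1 then []
    else
      match bsLoop (computeNum l) 0 0 l with
      | none => []   -- Python falls off the loop only for l = [] and returns None; excluded by Pre_
      | some i =>
        if i ≠ l.length - 1 then bsGo fuel (l.take (i + 1)) ++ [(i : Int) + 1]
        else [(i : Int)]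

def binary_split (l : List (List Int)) : List Int := bsGo l.length l

-- ===== PORT B =====
-- Source B's prefix-sum pass: state is (c, P)
def prefixP (l : List (List Int)) : Int × List Int :=
  l.foldl (fun st s => (st.1 + (s.length : Int), st.2 ++ [st.1 + (s.length : Int)])) (0, [0])

-- Source B's inner `while lo < hi` binary search; fuel = hi - lo always suffices; list
-- indexing P[mid] is always in range in Source B, ported as getD _ 0 (exact on indices used).
def bisectGo (fuel : Nat) (P : List Int) (x : Int) (lo hi : Nat) : Nat :=
  match fuel with
  | 0 => lo
  | fuel + 1 =>
    if lo < hi then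
      if P.getD ((lo + hi) / 2) 0 < x then bisectGo fuel P x ((lo + hi) / 2 + 1) hi
      else bisectGo fuel P x lo ((lo + hi) / 2)
    else lo

def bisectLeft (P : List Int) (x : Int) (lo hi : Nat) : Nat :=
  bisectGo (hi - lo) P x lo hi

-- Source B's outer `while m > 1` loop over the prefix-sum table; fuel = m always suffices
def altGo (fuel : Nat) (P : List Int) (m : Nat) (out : List Int) : List Int :=
  match fuel with
  | 0 => out
  | fuel + 1 =>
    if m > 1 then
      if bisectLeft P (PySem.Int.floordiv (P.getD m 0 + 1) 2) 1 m = m then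
        out ++ [((m - 1 : Nat) : Int)]
      else
        altGo fuel P (bisectLeft P (PySem.Int.floordiv (P.getD m 0 + 1) 2) 1 m)
          (out ++ [(bisectLeft P (PySem.Int.floordiv (P.getD m 0 + 1) 2) 1 m : Int)])
    else out

def binary_split_alt (l : List (List Int)) : List Int :=
  (altGo l.length (prefixP l).2 l.length []).reverse

-- ===== PRECONDITION & SPEC =====
-- Pre_ excludes only the empty list, on which Python A falls through its loop and
-- returns None (no value of the declared list type); B naturally returns [] there.
def Pre_binary_split (l : List (List Int)) : Prop := l ≠ []
instance (l : List (List Int)) : Decidable (Pre_binary_split l) := by unfold Pre_binary_split; infer_instance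
def pvWitness_binary_split : List (List Int) := [[1, 2], [3]]

def Spec_binary_split (l : List (List Int)) (out : List Int) : Prop := out = binary_split_alt l
instance (l : List (List Int)) (out : List Int) : Decidable (Spec_binary_split l out) := by unfold Spec_binary_split; infer_instance

-- ===== CLAIM (what is proved, stated in full; the proofs are below) =====
def Claim_equal_binary_split : Prop := ∀ (l : List (List Int)), Dom_binary_split l → Pre_binary_split l → Spec_binary_split l (binary_split l)

-- ===== LEMMAS AND PROOFS =====

-- prefix sum of the first k element-lengths
def S (l : List (List Int)) (k : Nat) : Int := ((l.take k).map (fun s => (s.length : Int))).sum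

theorem S_zero (l : List (List Int)) : S l 0 = 0 := by simp [S]

theorem S_cons_succ (s : List Int) (l : List (List Int)) (k : Nat) :
    S (s :: l) (k + 1) = (s.length : Int) + S l k := by
  simp [S, List.take_succ_cons]

theorem S_nonneg (l : List (List Int)) (k : Nat) : 0 ≤ S l k := by
  apply List.sum_nonneg
  intro x hx
  simp only [List.mem_map] at hx
  obtain ⟨s, _, rfl⟩ := hx
  positivity

theorem S_succ (l : List (List Int)) (k : Nat) (hk : k < l.length) :
    S l (k + 1) = S l k + ((l[k]'hk).length : Int) := by
  unfold S
  rw [List.take_add_one, List.getElem?_eq_getElem hk, List.map_append, List.sum_append]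
  simp

theorem S_mono (l : List (List Int)) : ∀ (j k : Nat), j ≤ k → S l j ≤ S l k := by
  intro j k hjk
  induction k with
  | zero => simp_all
  | succ n ih =>
    rcases Nat.lt_or_ge j (n + 1) with h | h
    · by_cases hn : n < l.length
      · have := ih (by omega)
        have := S_succ l n hn
        have : (0:Int) ≤ ((l[n]'hn).length : Int) := by positivity
        omega
      · have : l.take (n + 1) = l.take n := by
          rw [List.take_of_length_le (by omega), List.take_of_length_le (by omega)]
        simp only [S, this]
        exact ih (by omega)
    · have : j = n + 1 := by omega
      simp [this]

theorem computeNum_eq (l : List (List Int)) : computeNum l = S l l.length := by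
  suffices h : ∀ (xs : List (List Int)) (c : Int),
      xs.foldl (fun acc s => acc + (s.length : Int)) c = c + S xs xs.length by
    simpa [computeNum] using h l 0
  intro xs
  induction xs with
  | nil => intro c; simp [S]
  | cons s rest ih =>
    intro c
    simp only [List.foldl_cons, ih, List.length_cons, S_cons_succ]
    ring

theorem prefixP_spec : ∀ (l : List (List Int)) (c : Int) (P : List Int),
    l.foldl (fun st s => (st.1 + (s.length : Int), st.2 ++ [st.1 + (s.length : Int)])) (c, P)
      = (c + S l l.length, P ++ (List.range l.length).map (fun k => c + S l (k + 1))) := by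
  intro l
  induction l with
  | nil => intro c P; simp [S]
  | cons s rest ih =>
    intro c P
    simp only [List.foldl_cons, ih, List.length_cons, Prod.mk.injEq]
    refine ⟨by rw [S_cons_succ]; ring, ?_⟩
    rw [List.range_succ_eq_map, List.map_cons, List.map_map, List.append_assoc,
      List.singleton_append]
    have h0 : c + S (s :: rest) (0 + 1) = c + (s.length : Int) := by
      rw [S_cons_succ, S_zero]; ring
    rw [h0]
    have hcons : ∀ (M M' : List Int), M = M' →
        P ++ (c + (s.length : Int)) :: M = P ++ (c + (s.length : Int)) :: M' := by
      intro M M' hm; rw [hm]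
    apply hcons
    apply List.map_congr_left
    intro k _
    simp only [Function.comp_apply, Nat.succ_eq_add_one, S_cons_succ]
    ring

theorem Pget (l : List (List Int)) (k : Nat) (hk : k ≤ l.length) :
    (prefixP l).2.getD k 0 = S l k := by
  have h := prefixP_spec l 0 [0]
  unfold prefixP
  rw [h]
  rcases k with _ | k
  · simp [S_zero]
  · have hk' : k < l.length := by omega
    rw [List.getD_eq_getElem _ _ (by simp; omega)]
    simp

theorem bsLoop_eq : ∀ (xs : List (List Int)) (total cur : Int) (i0 j : Nat),
    j < xs.length →
    2 * (cur + S xs (j + 1)) ≥ total →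
    (∀ k, k < j → ¬ 2 * (cur + S xs (k + 1)) ≥ total) →
    bsLoop total cur i0 xs = some (i0 + j) := by
  intro xs
  induction xs with
  | nil => intro _ _ _ j h; simp at h
  | cons s rest ih =>
    intro total cur i0 j hj hsat hmin
    simp only [bsLoop]
    split
    · rename_i hcond
      rcases j with _ | j
      · simp
      · exact absurd (by simpa [S_cons_succ, S_zero] using hcond) (by
          have := hmin 0 (by omega)
          simpa [S_cons_succ, S_zero] using this)
    · rename_i hcond
      rcases j with _ | j
      · exact absurd (by simpa [S_cons_succ, S_zero] using hsat)
          (by simpa [S_cons_succ, S_zero] using hcond)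
      · have hrec := ih total (cur + (s.length : Int)) (i0 + 1) j (by simpa using hj)
          (by have := hsat; simp only [S_cons_succ] at this; linarith)
          (by intro k hk
              have := hmin (k + 1) (by omega)
              simp only [S_cons_succ] at this
              intro hc; exact this (by linarith))
        rw [hrec]
        congr 1
        omega

theorem bisectGo_eq : ∀ (fuel : Nat) (P : List Int) (x : Int) (lo hi j : Nat),
    hi - lo ≤ fuel → lo ≤ j → j ≤ hi →
    (∀ k, lo ≤ k → k < j → P.getD k 0 < x) →
    (∀ k, j ≤ k → k < hi → ¬ P.getD k 0 < x) →
    bisectGo fuel P x lo hi = j := by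
  intro fuel
  induction fuel with
  | zero =>
    intro P x lo hi j hf h1 h2 _ _
    simp only [bisectGo]
    omega
  | succ n ih =>
    intro P x lo hi j hf h1 h2 hlt hge
    simp only [bisectGo]
    split
    · rename_i hlohi
      split
      · rename_i hmid
        have hjmid : (lo + hi) / 2 < j := by
          by_contra hc
          exact hge _ (by omega) (by omega) hmid
        exact ih P x _ hi j (by omega) (by omega) h2
          (fun k hk1 hk2 => hlt k (by omega) hk2) hge
      · rename_i hmid
        have hjmid : j ≤ (lo + hi) / 2 := by
          by_contra hc
          exact hmid (hlt _ (by omega) (by omega))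
        exact ih P x lo _ j (by omega) h1 hjmid hlt
          (fun k hk1 hk2 => hge k hk1 (by omega))
    · omega

theorem bisectLeft_eq (P : List Int) (x : Int) (lo hi j : Nat)
    (h1 : lo ≤ j) (h2 : j ≤ hi)
    (hlt : ∀ k, lo ≤ k → k < j → P.getD k 0 < x)
    (hge : ∀ k, j ≤ k → k < hi → ¬ P.getD k 0 < x) :
    bisectLeft P x lo hi = j :=
  bisectGo_eq (hi - lo) P x lo hi j (le_refl _) h1 h2 hlt hge

-- main invariant: B's outer loop on the first m groups produces the reverse of A's
-- result there, for any sufficient fuel on either side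
theorem main_inv (l : List (List Int)) : ∀ (m : Nat), 1 ≤ m → m ≤ l.length →
    ∀ (fa fb : Nat), m ≤ fa → m ≤ fb → ∀ (out : List Int),
    altGo fb (prefixP l).2 m out = out ++ (bsGo fa (l.take m)).reverse := by
  intro m
  induction m using Nat.strong_induction_on with
  | _ m ih =>
  intro hm1 hmn fa fb hfa hfb out
  rcases fa with _ | fa
  · omega
  rcases fb with _ | fb
  · omega
  rcases Nat.lt_or_ge m 2 with hm2 | hm2
  · -- m = 1
    have hm : m = 1 := by omega
    subst hm
    simp only [altGo, gt_iff_lt, lt_irrefl, if_false]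
    have hlen : (l.take 1).length = 1 := by simp; omega
    simp only [bsGo, hlen]
    simp
  · -- m ≥ 2
    set T := S l m with hT
    have hex : ∃ j, 1 ≤ j ∧ 2 * S l j ≥ T := ⟨m, by omega, by have := S_nonneg l m; omega⟩
    classical
    set jm := Nat.find hex with hjm
    have hjm_spec := Nat.find_spec hex
    have hjm_le : jm ≤ m := Nat.find_le ⟨by omega, by have := S_nonneg l m; omega⟩
    have hjm_ge : 1 ≤ jm := hjm_spec.1
    have hjm_min : ∀ k, k < jm → ¬ (1 ≤ k ∧ 2 * S l k ≥ T) := fun k hk => Nat.find_min hex hk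
    -- prefix-sum values on the take
    have hStake : ∀ k, k ≤ m → S (l.take m) k = S l k := by
      intro k hk
      simp [S, List.take_take, Nat.min_eq_left hk]
    -- A's loop on l.take m finds index jm - 1
    have hlen_take : (l.take m).length = m := by simp; omega
    have htotal : computeNum (l.take m) = T := by
      rw [computeNum_eq, hlen_take, hStake m (by omega)]
    have hloop : bsLoop (computeNum (l.take m)) 0 0 (l.take m) = some (jm - 1) := by
      rw [htotal]
      have := bsLoop_eq (l.take m) T 0 0 (jm - 1)
        (by omega)
        (by rw [hStake _ (by omega)]; have : jm - 1 + 1 = jm := by omega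
            rw [this]; simpa using hjm_spec.2)
        (by intro k hk
            rw [hStake _ (by omega)]
            have := hjm_min (k + 1) (by omega)
            intro hc
            exact this ⟨by omega, by simpa using hc⟩)
      simpa using this
    -- B's threshold
    have hPm : (prefixP l).2.getD m 0 = T := Pget l m hmn
    have hx_iff : ∀ a : Int,
        ¬ a < PySem.Int.floordiv ((prefixP l).2.getD m 0 + 1) 2 ↔ 2 * a ≥ T := by
      intro a
      rw [hPm, PySem.Int.floordiv_eq_ediv_of_pos (by omega)]
      omega
    -- A on l.take m: not the length-1 case, and its loop finds jm - 1
    have hA : bsGo (fa + 1) (l.take m) =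
        if jm - 1 ≠ m - 1 then
          bsGo fa ((l.take m).take (jm - 1 + 1)) ++ [((jm - 1 : Nat) : Int) + 1]
        else [((jm - 1 : Nat) : Int)] := by
      simp only [bsGo, hlen_take]
      rw [if_neg (by omega), hloop]
    by_cases hcase : jm = m
    · -- split at the last group: A returns [m-1], B hits the j = m branch
      have hbis : bisectLeft (prefixP l).2
          (PySem.Int.floordiv ((prefixP l).2.getD m 0 + 1) 2) 1 m = m := by
        apply bisectLeft_eq _ _ 1 m m (by omega) (le_refl m)
        · intro k hk1 hk2
          rw [Pget l k (by omega)]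
          by_contra hc
          exact hjm_min k (by omega) ⟨hk1, (hx_iff (S l k)).mp hc⟩
        · intro k hk1 hk2; omega
      simp only [altGo]
      rw [if_pos (show m > 1 by omega), hbis, if_pos rfl]
      rw [hA, if_neg (by omega)]
      simp [hcase]
    · -- interior split: A recurses on l.take jm, B loops with m := jm
      have hjm_lt : jm < m := by omega
      have hbis : bisectLeft (prefixP l).2
          (PySem.Int.floordiv ((prefixP l).2.getD m 0 + 1) 2) 1 m = jm := by
        apply bisectLeft_eq _ _ 1 m jm (by omega) (by omega)
        · intro k hk1 hk2
          rw [Pget l k (by omega)]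
          by_contra hc
          exact hjm_min k (by omega) ⟨hk1, (hx_iff (S l k)).mp hc⟩
        · intro k hk1 hk2
          rw [Pget l k (by omega)]
          rw [hx_iff (S l k)]
          have h1 : S l jm ≤ S l k := S_mono l jm k hk1
          have h2 : 2 * S l jm ≥ T := hjm_spec.2
          omega
      simp only [altGo]
      rw [if_pos (show m > 1 by omega), hbis, if_neg hcase]
      rw [ih jm hjm_lt (by omega) (by omega) fa fb (by omega) (by omega)]
      rw [hA, if_pos (by omega)]
      have htt : (l.take m).take (jm - 1 + 1) = l.take jm := by
        rw [List.take_take]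
        congr 1
        omega
      rw [htt]
      have hcast : ((jm - 1 : Nat) : Int) + 1 = (jm : Int) := by omega
      rw [hcast]
      simp

theorem alt_eq (l : List (List Int)) (h : l ≠ []) : binary_split_alt l = binary_split l := by
  have hn : 1 ≤ l.length := by
    cases l with
    | nil => simp at h
    | cons a t => simp
  unfold binary_split_alt binary_split
  rw [main_inv l l.length hn (le_refl _) l.length l.length (le_refl _) (le_refl _) []]
  simp

-- ===== VERDICT (by name: the statement is the Claim_ definition above) =====
theorem binary_split_spec : Claim_equal_binary_split := by
  intro l _ hpre
  unfold Spec_binary_split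
  exact (alt_eq l hpre).symm
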